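-- pv_equiv track=rewrite | github.com/alexlee92/stella | agent/changelog.py | _infer_change_type
-- ===== SOURCE A (Python) =====
-- from typing import Dict, List, Optional
--
-- def _infer_change_type(goal: str, files: List[str]) -> str:
--     """Infer conventional commit type from goal and files."""
--     low = goal.lower()
--     if any(k in low for k in ["fix", "bug", "correct", "repair", "corrig"]):
--         return "fix"
--     if any(k in low for k in ["test", "spec", "coverage"]):
--         return "test"
--     if any(k in low for k in ["refactor", "clean", "restructur"]):
--         return "refactor"
--     if any(k in low for k in ["doc", "readme", "comment"]):
--         return "docs"
--     if any(k in low for k in ["perf", "optimiz", "speed", "latenc"]):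
--         return "perf"
--     if any(f.endswith((".toml", ".yaml", ".yml", ".json", ".cfg")) for f in files):
--         return "chore"
--     return "feat"
-- ===== SOURCE B (Python) =====
-- _KEYWORDS = [
--     ("fix", 0), ("bug", 0), ("correct", 0), ("repair", 0), ("corrig", 0),
--     ("test", 1), ("spec", 1), ("coverage", 1),
--     ("refactor", 2), ("clean", 2), ("restructur", 2),
--     ("doc", 3), ("readme", 3), ("comment", 3),
--     ("perf", 4), ("optimiz", 4), ("speed", 4), ("latenc", 4),
-- ]
-- _TYPES = ("fix", "test", "refactor", "docs", "perf")
-- _CONFIG_EXTS = (".toml", ".yaml", ".yml", ".json", ".cfg")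
--
--
-- def _infer_change_type(goal, files):
--     """Infer conventional commit type from goal and files."""
--     low = goal.lower()
--     best = None
--     # one left-to-right scan of the goal, keeping the highest-priority
--     # (lowest-numbered) keyword category seen anywhere in the text
--     for i in range(len(low)):
--         for kw, pri in _KEYWORDS:
--             if low.startswith(kw, i) and (best is None or pri < best):
--                 best = pri
--     if best is not None:
--         return _TYPES[best]
--     if any(f.endswith(_CONFIG_EXTS) for f in files):
--         return "chore"
--     return "feat"
-- ===== Notes on version B (the rewrite author's own statement) =====
-- stated objective: alternative
-- what changed: Instead of A's cascade of per-category any-substring searches, B makes one left-to-right scan over the positions of the lowered goal, matching a flat (keyword, priority) list at each position and accumulating the lowest matched priority, then maps that priority to the commit type; the extension check and 'feat' default are unchanged.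
import Mathlib
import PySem

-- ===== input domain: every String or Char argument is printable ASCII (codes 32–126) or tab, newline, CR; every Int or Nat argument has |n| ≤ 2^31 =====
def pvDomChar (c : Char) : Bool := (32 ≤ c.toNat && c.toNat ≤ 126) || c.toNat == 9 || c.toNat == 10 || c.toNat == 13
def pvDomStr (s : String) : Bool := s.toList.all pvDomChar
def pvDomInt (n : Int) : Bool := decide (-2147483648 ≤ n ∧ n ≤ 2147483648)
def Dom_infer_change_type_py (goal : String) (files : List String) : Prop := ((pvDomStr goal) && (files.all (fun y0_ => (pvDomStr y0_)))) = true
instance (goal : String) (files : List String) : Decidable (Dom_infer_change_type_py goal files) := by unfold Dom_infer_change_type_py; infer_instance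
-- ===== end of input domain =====

-- B replaces A's cascade of per-keyword substring searches by ONE left-to-right scan of the
-- goal text that accumulates the best (lowest-numbered) matching keyword category (alternative).

-- ===== PORT A =====
def infer_change_type_py (goal : String) (files : List String) : String :=
  let low := PySem.Str.lower goal
  if (["fix", "bug", "correct", "repair", "corrig"].any fun k => PySem.Str.isIn k low) then "fix"
  else if (["test", "spec", "coverage"].any fun k => PySem.Str.isIn k low) then "test"
  else if (["refactor", "clean", "restructur"].any fun k => PySem.Str.isIn k low) then "refactor"
  else if (["doc", "readme", "comment"].any fun k => PySem.Str.isIn k low) then "docs"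
  else if (["perf", "optimiz", "speed", "latenc"].any fun k => PySem.Str.isIn k low) then "perf"
  else if (files.any fun f => [".toml", ".yaml", ".yml", ".json", ".cfg"].any fun e => PySem.Str.endswith f e) then "chore"
  else "feat"

-- ===== PORT B =====
-- Source B's flat (keyword, priority) list _KEYWORDS
def kwPriority : List (String × Nat) :=
  [("fix", 0), ("bug", 0), ("correct", 0), ("repair", 0), ("corrig", 0),
   ("test", 1), ("spec", 1), ("coverage", 1),
   ("refactor", 2), ("clean", 2), ("restructur", 2),
   ("doc", 3), ("readme", 3), ("comment", 3),
   ("perf", 4), ("optimiz", 4), ("speed", 4), ("latenc", 4)]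

def ctTypes : List String := ["fix", "test", "refactor", "docs", "perf"]

def cfgExts : List String := [".toml", ".yaml", ".yml", ".json", ".cfg"]

-- Source B: one scan over the positions of low, keeping the lowest matching priority.
-- low.startswith(kw, i) with 0 ≤ i is exactly kw.toList.isPrefixOf (low.toList.drop i).
def infer_change_type_py_alt (goal : String) (files : List String) : String :=
  let low := (PySem.Str.lower goal).toList
  let best := (List.range low.length).foldl (fun best i =>
      kwPriority.foldl (fun best kp =>
        if kp.1.toList.isPrefixOf (low.drop i) &&
           (match best with | none => true | some b => decide (kp.2 < b))
        then some kp.2 else best) best) (none : Option Nat)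
  match best with
  | some p => (PySem.List.pyGet? ctTypes (p : Int)).getD ""  -- _TYPES[best]; p < 5 always, getD totalizes
  | none =>
      if files.any (fun f => cfgExts.any fun e => PySem.Str.endswith f e) then "chore"
      else "feat"

-- ===== PRECONDITION & SPEC =====
def Spec_infer_change_type_py (goal : String) (files : List String) (out : String) : Prop := out = infer_change_type_py_alt goal files
instance (goal : String) (files : List String) (out : String) : Decidable (Spec_infer_change_type_py goal files out) := by unfold Spec_infer_change_type_py; infer_instance

-- ===== CLAIM =====
def Claim_equal_infer_change_type_py : Prop := ∀ (goal : String) (files : List String), Dom_infer_change_type_py goal files → Spec_infer_change_type_py goal files (infer_change_type_py goal files)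

-- ===== LEMMAS AND PROOFS =====

-- the keywords of Source B's scan that match somewhere in low, as their priority numbers
def matchedAt (low : List Char) (i : Nat) : List Nat :=
  (kwPriority.filter (fun kp => kp.1.toList.isPrefixOf (low.drop i))).map (·.2)

def matchedList (low : List Char) : List Nat :=
  (List.range low.length).flatMap (matchedAt low)

def mstep (b : Option Nat) (p : Nat) : Option Nat :=
  if (match b with | none => true | some x => decide (p < x)) then some p else b

lemma inner_fold (low : List Char) (i : Nat) (L : List (String × Nat)) (b : Option Nat) :
    L.foldl (fun best kp =>
        if kp.1.toList.isPrefixOf (low.drop i) &&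
           (match best with | none => true | some b => decide (kp.2 < b))
        then some kp.2 else best) b
      = ((L.filter (fun kp => kp.1.toList.isPrefixOf (low.drop i))).map (·.2)).foldl mstep b := by
  induction L generalizing b with
  | nil => rfl
  | cons kp rest ih =>
      simp only [List.foldl_cons, List.filter_cons]
      by_cases h : kp.1.toList.isPrefixOf (low.drop i)
      · rw [if_pos h]
        simp only [h, Bool.true_and, List.map_cons, List.foldl_cons]
        rw [ih]
        rfl
      · rw [if_neg h]
        simp only [h, Bool.false_and, Bool.false_eq_true, if_false]
        exact ih b

lemma outer_fold (g : Nat → List Nat) (L : List Nat) (b : Option Nat) :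
    L.foldl (fun b i => (g i).foldl mstep b) b = (L.flatMap g).foldl mstep b := by
  induction L generalizing b with
  | nil => rfl
  | cons i rest ih => simp [List.flatMap_cons, List.foldl_append, ih]

lemma mstep_some (b : Nat) (l : List Nat) : l.foldl mstep (some b) = some (l.foldl min b) := by
  induction l generalizing b with
  | nil => rfl
  | cons p rest ih =>
      simp only [List.foldl_cons, mstep]
      by_cases h : p < b
      · simp [h, ih, Nat.le_of_lt h]
      · simp [h, ih, Nat.min_eq_left (by omega : b ≤ p)]

lemma mstep_none (l : List Nat) : l.foldl mstep none = l.min? := by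
  cases l with
  | nil => rfl
  | cons a rest =>
      rw [List.foldl_cons]
      show List.foldl mstep (some a) rest = _
      rw [mstep_some]
      rfl

-- the five group conditions of A, at the List Char level
def cGrp (ks : List String) (low : List Char) : Prop :=
  ∃ k ∈ ks, PySem.Chars.isIn k.toList low = true

lemma mem_matchedList (low : List Char) (b : Nat) :
    b ∈ matchedList low ↔ ∃ kp ∈ kwPriority, kp.2 = b ∧ PySem.Chars.isIn kp.1.toList low = true := by
  unfold matchedList matchedAt
  simp only [List.mem_flatMap, List.mem_range, List.mem_map, List.mem_filter]
  constructor
  · rintro ⟨i, hi, kp, ⟨hkp, hpre⟩, hb⟩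
    refine ⟨kp, hkp, hb, ?_⟩
    rw [← PySem.Chars.exists_prefix_drop_iff_isIn]
    exact ⟨i, (List.isPrefixOf_iff_prefix).1 hpre⟩
  · rintro ⟨kp, hkp, hb, hin⟩
    obtain ⟨j, hj⟩ := (PySem.Chars.exists_prefix_drop_iff_isIn _ _).2 hin
    have hne : kp.1.toList ≠ [] := by
      simp only [kwPriority, List.mem_cons, List.not_mem_nil, or_false] at hkp
      rcases hkp with rfl|rfl|rfl|rfl|rfl|rfl|rfl|rfl|rfl|rfl|rfl|rfl|rfl|rfl|rfl|rfl|rfl|rfl <;> decide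
    have hjlt : j < low.length := by
      by_contra h
      have : low.drop j = [] := List.drop_eq_nil_iff.2 (by omega)
      rw [this] at hj
      exact hne (List.prefix_nil.1 hj)
    exact ⟨j, hjlt, kp, ⟨hkp, (List.isPrefixOf_iff_prefix).2 hj⟩, hb⟩

lemma mem_matchedList_iff (low : List Char) (b : Nat) :
    b ∈ matchedList low ↔
      (b = 0 ∧ cGrp ["fix", "bug", "correct", "repair", "corrig"] low) ∨
      (b = 1 ∧ cGrp ["test", "spec", "coverage"] low) ∨
      (b = 2 ∧ cGrp ["refactor", "clean", "restructur"] low) ∨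
      (b = 3 ∧ cGrp ["doc", "readme", "comment"] low) ∨
      (b = 4 ∧ cGrp ["perf", "optimiz", "speed", "latenc"] low) := by
  rw [mem_matchedList]
  unfold cGrp kwPriority
  constructor
  · rintro ⟨kp, hkp, hb, hin⟩
    subst hb
    simp only [List.mem_cons, List.not_mem_nil, or_false] at hkp
    rcases hkp with rfl|rfl|rfl|rfl|rfl|rfl|rfl|rfl|rfl|rfl|rfl|rfl|rfl|rfl|rfl|rfl|rfl|rfl <;> simp_all
  · rintro (⟨rfl, k, hk, hin⟩|⟨rfl, k, hk, hin⟩|⟨rfl, k, hk, hin⟩|⟨rfl, k, hk, hin⟩|⟨rfl, k, hk, hin⟩)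
    · exact ⟨(k, 0), by simp_all, rfl, hin⟩
    · exact ⟨(k, 1), by simp_all, rfl, hin⟩
    · exact ⟨(k, 2), by simp_all, rfl, hin⟩
    · exact ⟨(k, 3), by simp_all, rfl, hin⟩
    · exact ⟨(k, 4), by simp_all, rfl, hin⟩

lemma best_eq_min? (low : List Char) :
    (List.range low.length).foldl (fun best i =>
      kwPriority.foldl (fun best kp =>
        if kp.1.toList.isPrefixOf (low.drop i) &&
           (match best with | none => true | some b => decide (kp.2 < b))
        then some kp.2 else best) best) (none : Option Nat)
      = (matchedList low).min? := by
  have hfun : (fun (best : Option Nat) i =>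
      kwPriority.foldl (fun best kp =>
        if kp.1.toList.isPrefixOf (low.drop i) &&
           (match best with | none => true | some b => decide (kp.2 < b))
        then some kp.2 else best) best)
      = (fun (b : Option Nat) i => (matchedAt low i).foldl mstep b) := by
    funext b i
    unfold matchedAt
    exact inner_fold low i kwPriority b
  rw [hfun, outer_fold, mstep_none]
  rfl

lemma agroup_iff (ks : List String) (low : String) :
    ((ks.any fun k => PySem.Str.isIn k low) = true) ↔ cGrp ks low.toList := by
  unfold cGrp
  simp [PySem.Str.isIn_eq]

-- ===== VERDICT =====
set_option maxHeartbeats 1000000 in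
theorem infer_change_type_py_spec : Claim_equal_infer_change_type_py := by
  intro goal files _
  unfold Spec_infer_change_type_py infer_change_type_py infer_change_type_py_alt
  dsimp only
  rw [best_eq_min?]
  set low := PySem.Str.lower goal with hlow
  by_cases h0 : (["fix", "bug", "correct", "repair", "corrig"].any fun k => PySem.Str.isIn k low) = true
  · have hm : (matchedList low.toList).min? = some 0 := by
      rw [List.min?_eq_some_iff']
      refine ⟨?_, fun b _ => Nat.zero_le b⟩
      rw [mem_matchedList_iff]; exact Or.inl ⟨rfl, (agroup_iff _ _).1 h0⟩
    rw [if_pos h0, hm]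
    rfl
  by_cases h1 : (["test", "spec", "coverage"].any fun k => PySem.Str.isIn k low) = true
  · have hm : (matchedList low.toList).min? = some 1 := by
      rw [List.min?_eq_some_iff']
      constructor
      · rw [mem_matchedList_iff]; exact Or.inr (Or.inl ⟨rfl, (agroup_iff _ _).1 h1⟩)
      · intro b hb
        rw [mem_matchedList_iff] at hb
        rcases hb with ⟨rfl, hc⟩|⟨rfl, _⟩|⟨rfl, _⟩|⟨rfl, _⟩|⟨rfl, _⟩
        · exact absurd ((agroup_iff _ _).2 hc) h0
        · omega
        · omega
        · omega
        · omega
    rw [if_neg h0, if_pos h1, hm]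
    rfl
  by_cases h2 : (["refactor", "clean", "restructur"].any fun k => PySem.Str.isIn k low) = true
  · have hm : (matchedList low.toList).min? = some 2 := by
      rw [List.min?_eq_some_iff']
      constructor
      · rw [mem_matchedList_iff]; exact Or.inr (Or.inr (Or.inl ⟨rfl, (agroup_iff _ _).1 h2⟩))
      · intro b hb
        rw [mem_matchedList_iff] at hb
        rcases hb with ⟨rfl, hc⟩|⟨rfl, hc⟩|⟨rfl, _⟩|⟨rfl, _⟩|⟨rfl, _⟩
        · exact absurd ((agroup_iff _ _).2 hc) h0
        · exact absurd ((agroup_iff _ _).2 hc) h1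
        · omega
        · omega
        · omega
    rw [if_neg h0, if_neg h1, if_pos h2, hm]
    rfl
  by_cases h3 : (["doc", "readme", "comment"].any fun k => PySem.Str.isIn k low) = true
  · have hm : (matchedList low.toList).min? = some 3 := by
      rw [List.min?_eq_some_iff']
      constructor
      · rw [mem_matchedList_iff]
        exact Or.inr (Or.inr (Or.inr (Or.inl ⟨rfl, (agroup_iff _ _).1 h3⟩)))
      · intro b hb
        rw [mem_matchedList_iff] at hb
        rcases hb with ⟨rfl, hc⟩|⟨rfl, hc⟩|⟨rfl, hc⟩|⟨rfl, _⟩|⟨rfl, _⟩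
        · exact absurd ((agroup_iff _ _).2 hc) h0
        · exact absurd ((agroup_iff _ _).2 hc) h1
        · exact absurd ((agroup_iff _ _).2 hc) h2
        · omega
        · omega
    rw [if_neg h0, if_neg h1, if_neg h2, if_pos h3, hm]
    rfl
  by_cases h4 : (["perf", "optimiz", "speed", "latenc"].any fun k => PySem.Str.isIn k low) = true
  · have hm : (matchedList low.toList).min? = some 4 := by
      rw [List.min?_eq_some_iff']
      constructor
      · rw [mem_matchedList_iff]
        exact Or.inr (Or.inr (Or.inr (Or.inr ⟨rfl, (agroup_iff _ _).1 h4⟩)))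
      · intro b hb
        rw [mem_matchedList_iff] at hb
        rcases hb with ⟨rfl, hc⟩|⟨rfl, hc⟩|⟨rfl, hc⟩|⟨rfl, hc⟩|⟨rfl, _⟩
        · exact absurd ((agroup_iff _ _).2 hc) h0
        · exact absurd ((agroup_iff _ _).2 hc) h1
        · exact absurd ((agroup_iff _ _).2 hc) h2
        · exact absurd ((agroup_iff _ _).2 hc) h3
        · omega
    rw [if_neg h0, if_neg h1, if_neg h2, if_neg h3, if_pos h4, hm]
    rfl
  · have hm : (matchedList low.toList).min? = none := by
      rw [List.min?_eq_none_iff, List.eq_nil_iff_forall_not_mem]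
      intro b hb
      rw [mem_matchedList_iff] at hb
      rcases hb with ⟨rfl, hc⟩|⟨rfl, hc⟩|⟨rfl, hc⟩|⟨rfl, hc⟩|⟨rfl, hc⟩
      · exact absurd ((agroup_iff _ _).2 hc) h0
      · exact absurd ((agroup_iff _ _).2 hc) h1
      · exact absurd ((agroup_iff _ _).2 hc) h2
      · exact absurd ((agroup_iff _ _).2 hc) h3
      · exact absurd ((agroup_iff _ _).2 hc) h4
    rw [if_neg h0, if_neg h1, if_neg h2, if_neg h3, if_neg h4, hm]
    rfl
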